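-- pv_equiv track=rewrite | github.com/NjengaSaruni/LeetCode-Python-Solutions | Random/fractal.py | fractal
-- ===== SOURCE A (Python) =====
-- def fractal(folds):
--     current = ''
--
--     for i in range(folds):
--         previous = current
--         current += 'L'
--         for j in previous:
--             if j == 'L':
--                 current += 'R'
--             else:
--                 current += 'L'
--
--     return current
-- ===== SOURCE B (Python) =====
-- def fractal(folds):
--     if folds < 1:
--         return ''
--     return ''.join('L' if bin(p).count('1') % 2 else 'R' for p in range(1, 2 ** folds))
-- ===== Notes on version B (the rewrite author's own statement) =====
-- stated objective: alternative
-- what changed: Replaces the iterative build (each fold appends 'L' plus the bit-flip of the previous string) with a per-index closed form: the character at 1-indexed position p is 'L' iff popcount(p) is odd, so the whole string is produced in one comprehension over range(1, 2**folds).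
import Mathlib
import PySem

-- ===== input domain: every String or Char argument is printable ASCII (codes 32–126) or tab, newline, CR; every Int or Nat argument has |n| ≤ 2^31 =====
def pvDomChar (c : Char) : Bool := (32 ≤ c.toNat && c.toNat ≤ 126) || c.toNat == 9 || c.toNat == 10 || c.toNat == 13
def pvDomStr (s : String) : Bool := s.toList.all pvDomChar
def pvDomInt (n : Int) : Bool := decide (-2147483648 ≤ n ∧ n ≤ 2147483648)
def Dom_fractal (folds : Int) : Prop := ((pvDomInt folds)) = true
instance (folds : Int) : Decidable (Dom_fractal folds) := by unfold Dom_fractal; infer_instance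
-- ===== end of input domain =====

-- B replaces A's iterative append-and-flip build by a per-index closed form
-- (character at 1-indexed position p is 'L' iff popcount p is odd); alternative algorithm, same cost class.

-- ===== PORT A =====
-- literal transliteration of A: for i in range(folds): previous = current; current += 'L';
-- for j in previous: current += 'R' if j == 'L' else 'L'   (strings carried as List Char, String.ofList at return)
def fractal (folds : Int) : String :=
  String.ofList ((PySem.List.pyRange 0 folds 1).foldl
    (fun current _ =>
      let previous := current
      previous.foldl (fun cur j => cur ++ [if j = 'L' then 'R' else 'L']) (current ++ ['L']))
    ([] : List Char))

-- ===== PORT B =====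
-- bin(p).count('1') for a nonnegative int
def pvPopcount (n : Nat) : Nat :=
  if n = 0 then 0 else n % 2 + pvPopcount (n / 2)
decreasing_by exact Nat.div_lt_self (Nat.pos_of_ne_zero (by assumption)) one_lt_two

-- literal transliteration of Source B: guard folds < 1, else join over range(1, 2**folds)
def fractal_alt (folds : Int) : String :=
  if folds < 1 then ""
  else String.ofList ((PySem.List.pyRange 1 (2 ^ folds.toNat) 1).map
    (fun p => if pvPopcount p.natAbs % 2 = 1 then 'L' else 'R'))

-- ===== PRECONDITION & SPEC =====
def Spec_fractal (folds : Int) (out : String) : Prop := out = fractal_alt folds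
instance (folds : Int) (out : String) : Decidable (Spec_fractal folds out) := by unfold Spec_fractal; infer_instance

-- ===== CLAIM (what is proved, stated in full; the proofs are below) =====
def Claim_equal_fractal : Prop := ∀ (folds : Int), Dom_fractal folds → Spec_fractal folds (fractal folds)

-- ===== LEMMAS AND PROOFS =====

def pvCh (p : Nat) : Char := if pvPopcount p % 2 = 1 then 'L' else 'R'

def pvFlip (c : Char) : Char := if c = 'L' then 'R' else 'L'

def pvS (n : Nat) : List Char := (List.range (2 ^ n - 1)).map (fun i => pvCh (i + 1))

def pvStepA (c : List Char) : List Char := c ++ 'L' :: c.map pvFlip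

theorem pvPopcount_eq (n : Nat) : pvPopcount n = n % 2 + pvPopcount (n / 2) := by
  rcases Nat.eq_zero_or_pos n with h | h
  · subst h; simp [pvPopcount]
  · rw [pvPopcount]; simp [Nat.pos_iff_ne_zero.mp h]

theorem pvPopcount_add_pow (n : Nat) : ∀ m, m < 2 ^ n → pvPopcount (2 ^ n + m) = pvPopcount m + 1 := by
  induction n with
  | zero =>
    intro m hm
    interval_cases m
    simp [pvPopcount]
  | succ n ih =>
    intro m hm
    rw [pvPopcount_eq (2 ^ (n + 1) + m), pvPopcount_eq m]
    have h2 : 2 ^ (n + 1) = 2 * 2 ^ n := by ring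
    have hmod : (2 ^ (n + 1) + m) % 2 = m % 2 := by omega
    have hdiv : (2 ^ (n + 1) + m) / 2 = 2 ^ n + m / 2 := by omega
    have hlt : m / 2 < 2 ^ n := by omega
    rw [hmod, hdiv, ih _ hlt]
    omega

theorem pvCh_flip (q : Nat) (hq : q < 2 ^ n) : pvCh (2 ^ n + q) = pvFlip (pvCh q) := by
  unfold pvCh pvFlip
  rw [pvPopcount_add_pow n q hq]
  by_cases h : pvPopcount q % 2 = 1
  · simp [h]; omega
  · simp [h, (by omega : (pvPopcount q + 1) % 2 = 1)]

theorem pvInnerFold (l : List Char) : ∀ init : List Char,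
    l.foldl (fun cur j => cur ++ [if j = 'L' then 'R' else 'L']) init = init ++ l.map pvFlip := by
  induction l with
  | nil => intro init; simp
  | cons a t ih => intro init; simp [List.foldl_cons, ih, pvFlip]

theorem pvS_succ (n : Nat) : pvS (n + 1) = pvStepA (pvS n) := by
  unfold pvS pvStepA
  have h1 : (1 : Nat) ≤ 2 ^ n := Nat.one_le_two_pow
  have hsplit : 2 ^ (n + 1) - 1 = (2 ^ n - 1) + (2 ^ n - 1 + 1) := by
    have : 2 ^ (n + 1) = 2 * 2 ^ n := by ring
    omega
  rw [hsplit, List.range_add, List.map_append]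
  congr 1
  rw [List.range_succ_eq_map, List.map_cons, List.map_map, List.map_map]
  have hA : 2 ^ n - 1 + 0 + 1 = 2 ^ n := by omega
  have hL : pvCh (2 ^ n) = 'L' := by
    have h0 : pvPopcount (2 ^ n) = 1 := by
      have h := pvPopcount_add_pow n 0 (by positivity)
      have hz : pvPopcount 0 = 0 := by rw [pvPopcount]; simp
      rw [Nat.add_zero] at h
      rw [h, hz]
    simp [pvCh, h0]
  refine List.cons_eq_cons.mpr ⟨?_, ?_⟩
  · show pvCh (2 ^ n - 1 + 0 + 1) = 'L'
    rw [hA, hL]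
  · rw [List.map_map]
    apply List.map_congr_left
    intro i hi
    have hi' : i < 2 ^ n - 1 := List.mem_range.mp hi
    show pvCh (2 ^ n - 1 + (i + 1) + 1) = pvFlip (pvCh (i + 1))
    have : 2 ^ n - 1 + (i + 1) + 1 = 2 ^ n + (i + 1) := by omega
    rw [this, pvCh_flip (i + 1) (by omega)]

theorem pvFoldIter (l : List Int) : ∀ c : List Char,
    l.foldl (fun cur _ => pvStepA cur) c = pvStepA^[l.length] c := by
  induction l with
  | nil => intro c; simp
  | cons a t ih => intro c; simp [List.foldl_cons, ih, Function.iterate_succ_apply]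

theorem pvIterS (n : Nat) : pvStepA^[n] ([] : List Char) = pvS n := by
  induction n with
  | zero => simp [pvS]
  | succ n ih => rw [Function.iterate_succ_apply', ih, ← pvS_succ]

theorem fractal_eq_S (folds : Int) : fractal folds = String.ofList (pvS folds.toNat) := by
  unfold fractal
  have hbody : (fun (current : List Char) (_ : Int) =>
      let previous := current
      previous.foldl (fun cur j => cur ++ [if j = 'L' then 'R' else 'L']) (current ++ ['L']))
      = fun current _ => pvStepA current := by
    funext current i
    simp only [pvInnerFold, pvStepA]
    simp
  rw [hbody, pvFoldIter, PySem.List.length_pyRange_one]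
  congr 1
  simpa using pvIterS (((folds : Int) - 0).toNat)

theorem fractal_alt_eq_S (folds : Int) (h : ¬ folds < 1) : fractal_alt folds = String.ofList (pvS folds.toNat) := by
  unfold fractal_alt
  rw [if_neg h, PySem.List.pyRange_one, List.map_map]
  unfold pvS
  congr 1
  have hpow : ((2 : Int) ^ folds.toNat - 1).toNat = 2 ^ folds.toNat - 1 := by
    have hcast : ((2 : Int) ^ folds.toNat) = ((2 ^ folds.toNat : Nat) : Int) := by push_cast; ring
    rw [hcast]
    have := Nat.one_le_two_pow (n := folds.toNat)
    omega
  rw [hpow]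
  apply List.map_congr_left
  intro k _
  simp only [Function.comp]
  have : ((1 : Int) + (k : Int)).natAbs = k + 1 := by omega
  rw [this]
  rfl

-- ===== VERDICT (by name: the statement is the Claim_ definition above) =====
theorem fractal_spec : Claim_equal_fractal := by
  intro folds _
  unfold Spec_fractal
  by_cases h : folds < 1
  · have hr : PySem.List.pyRange 0 folds 1 = [] := PySem.List.pyRange_one_eq_nil (by omega)
    unfold fractal fractal_alt
    rw [hr, if_pos h]
    rfl
  · rw [fractal_eq_S, fractal_alt_eq_S folds h]
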